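-- pv_equiv track=rewrite | github.com/ArikRahman/SafeHaven | SoftwareDemo/SnakepathAlgorithm/SnakePathGen.py | generate_snake_path_gantry
-- ===== SOURCE A (Python) =====
-- from typing import Tuple, List
--
-- def generate_snake_path_gantry(
--         x_min,
--         y_min,
--         x_max,
--         y_max,
--         step_x,
--         step_y,
--         origin_x,
--         origin_y
--     ):
--     x_min, x_max = sorted((int(x_min), int(x_max)))
--     y_min, y_max = sorted((int(y_min), int(y_max)))
--
--     x_cols = list(range(x_min, x_max + 1, step_x))
--     if x_cols[-1] != x_max:
--         x_cols.append(x_max)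
--
--     path: List[tuple[int, int]] = []
--
--     # 1) Origin = top-left corner (x_min, y_max)
--     x, y = int(origin_x), int(origin_y)
--     path.append((x, y))
--
--     if y != y_max:
--         path.append((x, y_max))
--         y = y_max
--     if x != x_min:
--         path.append((x_min, y))
--         x = x_min
--
--     # Indices
--     start_start_index = 0
--     start_end_index = len(path)
--
--     # 2) Snake columns
--     snake_start_index = max(0, len(path) - 1)
--
--     invertCount = 0     # Variable to count number of inverts (down to up)
--     downward = True
--
--     for i, cx in enumerate(x_cols):
--         if i > 0:
--             # horizontal connector at current Y
--             path.append((cx, path[-1][1]))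
--
--         if downward:
--             path.append((cx, y_min))   # full drop
--         else:
--             path.append((cx, y_max))   # full rise
--             invertCount += 1
--
--         downward = not downward
--
--     snake_end_index = len(path)
--
--     # 3) Return to origin (vertical then horizontal)
--     x_end, y_end = path[-1]
--     if y_end != origin_y:
--         path.append((x_end, origin_y))
--     if x_end != origin_x:
--         path.append((origin_x, origin_y))
--
--     return_start_index = snake_end_index - 1
--     return_end_index = len(path)
--
--     return (
--         path,
--         (start_start_index, start_end_index),
--         (snake_start_index, snake_end_index),
--         (return_start_index, return_end_index),
--         invertCount
--     )
-- ===== SOURCE B (Python) =====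
-- def generate_snake_path_gantry(x_min, y_min, x_max, y_max, step_x, step_y, origin_x, origin_y):
--     # Closed-form rebuild: the snake section is generated as an index-to-point
--     # formula over a flat point counter j (no per-column appends, no path[-1]
--     # reads, no downward flag, no invert counter); indices and invertCount come
--     # from arithmetic on the number of columns.
--     x_lo, x_hi = min(int(x_min), int(x_max)), max(int(x_min), int(x_max))
--     y_lo, y_hi = min(int(y_min), int(y_max)), max(int(y_min), int(y_max))
--
--     cols = list(range(x_lo, x_hi + 1, step_x))
--     if cols[-1] != x_hi:
--         cols.append(x_hi)
--     n = len(cols)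
--
--     ox, oy = int(origin_x), int(origin_y)
--
--     start = [(ox, oy)]
--     if oy != y_hi:
--         start.append((ox, y_hi))
--     if ox != x_lo:
--         start.append((x_lo, y_hi))
--
--     # point j of the snake (j = 0 .. 2n-2): x is column (j+1)//2,
--     # y is low/high according to the parity of j//2
--     snake = [(cols[(j + 1) // 2], y_lo if (j // 2) % 2 == 0 else y_hi)
--              for j in range(2 * n - 1)]
--
--     x_end, y_end = snake[-1]
--     tail = []
--     if y_end != oy:
--         tail.append((x_end, oy))
--     if x_end != ox:
--         tail.append((ox, oy))
--
--     s = len(start)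
--     e = s + len(snake)
--     return (start + snake + tail, (0, s), (s - 1, e), (e - 1, e + len(tail)), n // 2)
-- ===== Notes on version B (the rewrite author's own statement) =====
-- stated objective: alternative
-- what changed: B replaces A's stateful column loop (mutable path, path[-1] reads, a downward flag and an invert counter) by a closed-form index-to-point formula: the whole snake section is [(cols[(j+1)//2], y_lo if (j//2)%2==0 else y_hi) for j in range(2*n-1)], start/return legs are built separately, and all returned index pairs and invertCount (n//2) come from arithmetic on the column count.
-- outside the precondition, e.g. on generate_snake_path_gantry(0, 0, 3, 3, 0, 1, 0, 3): A raises ValueError, B raises ValueError; on generate_snake_path_gantry(0, 0, 3, 3, -1, 1, 0, 3): A raises IndexError, B raises IndexError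
import Mathlib
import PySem

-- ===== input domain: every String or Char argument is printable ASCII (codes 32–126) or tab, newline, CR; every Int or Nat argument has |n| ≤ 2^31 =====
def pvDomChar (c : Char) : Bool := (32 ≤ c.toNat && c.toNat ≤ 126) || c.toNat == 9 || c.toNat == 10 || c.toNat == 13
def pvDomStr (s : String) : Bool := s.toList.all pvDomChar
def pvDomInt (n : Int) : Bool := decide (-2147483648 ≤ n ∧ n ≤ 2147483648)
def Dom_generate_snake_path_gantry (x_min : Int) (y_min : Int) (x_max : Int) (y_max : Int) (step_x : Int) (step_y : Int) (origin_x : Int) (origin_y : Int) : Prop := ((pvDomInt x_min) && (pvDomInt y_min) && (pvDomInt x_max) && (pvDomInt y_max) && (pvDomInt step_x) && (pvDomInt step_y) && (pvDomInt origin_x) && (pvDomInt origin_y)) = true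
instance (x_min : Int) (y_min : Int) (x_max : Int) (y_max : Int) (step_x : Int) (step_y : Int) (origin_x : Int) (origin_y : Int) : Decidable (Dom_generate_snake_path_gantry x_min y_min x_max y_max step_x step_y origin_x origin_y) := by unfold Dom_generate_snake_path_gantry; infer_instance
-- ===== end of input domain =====

-- B generates the snake section by a closed-form index-to-point formula over a flat point
-- counter (no per-column appends, no path[-1] reads, no downward flag, no invert counter),
-- with indices and invertCount from arithmetic on the column count ("alternative").

-- ===== PORT A =====
-- loop body of A's `for i, cx in enumerate(x_cols)` (state = (path, invertCount, downward))
def pvStepA (ylo yhi : Int) (st : List (Int × Int) × Int × Bool) (icx : Int × Int) :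
    List (Int × Int) × Int × Bool :=
  -- `path.append((cx, path[-1][1]))`; path is never empty here, so pyGetD's default is unreachable
  let path := if icx.1 > 0 then st.1 ++ [(icx.2, (PySem.List.pyGetD st.1 (-1) (0, 0)).2)] else st.1
  if st.2.2 then (path ++ [(icx.2, ylo)], st.2.1, false)
  else (path ++ [(icx.2, yhi)], st.2.1 + 1, true)

def generate_snake_path_gantry (x_min : Int) (y_min : Int) (x_max : Int) (y_max : Int) (step_x : Int) (step_y : Int) (origin_x : Int) (origin_y : Int) : (List (Int × Int)) × (Int × Int) × (Int × Int) × (Int × Int) × Int :=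
  -- `x_min, x_max = sorted((x_min, x_max))` on two ints is (min, max)
  let xlo := min x_min x_max
  let xhi := max x_min x_max
  let ylo := min y_min y_max
  let yhi := max y_min y_max
  let x_cols0 := PySem.List.pyRange xlo (xhi + 1) step_x
  -- `x_cols[-1]` raises IndexError on the empty list (step_x ≤ 0): excluded by Pre_, default unreachable
  let x_cols := if PySem.List.pyGetD x_cols0 (-1) 0 ≠ xhi then x_cols0 ++ [xhi] else x_cols0
  let path0 : List (Int × Int) := [(origin_x, origin_y)]
  let path1 := if origin_y ≠ yhi then path0 ++ [(origin_x, yhi)] else path0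
  let y1 := if origin_y ≠ yhi then yhi else origin_y
  let path2 := if origin_x ≠ xlo then path1 ++ [(xlo, y1)] else path1
  let start_start_index : Int := 0
  let start_end_index : Int := path2.length
  let snake_start_index : Int := max 0 ((path2.length : Int) - 1)
  let st := (PySem.List.enumerate x_cols 0).foldl (pvStepA ylo yhi) (path2, 0, true)
  let path3 := st.1
  let invertCount := st.2.1
  let snake_end_index : Int := path3.length
  let xe := (PySem.List.pyGetD path3 (-1) (0, 0)).1
  let ye := (PySem.List.pyGetD path3 (-1) (0, 0)).2
  let path4 := if ye ≠ origin_y then path3 ++ [(xe, origin_y)] else path3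
  let path5 := if xe ≠ origin_x then path4 ++ [(origin_x, origin_y)] else path4
  let return_start_index := snake_end_index - 1
  let return_end_index : Int := path5.length
  (path5, (start_start_index, start_end_index), (snake_start_index, snake_end_index),
   (return_start_index, return_end_index), invertCount)

-- ===== PORT B =====
def generate_snake_path_gantry_alt (x_min : Int) (y_min : Int) (x_max : Int) (y_max : Int) (step_x : Int) (step_y : Int) (origin_x : Int) (origin_y : Int) : (List (Int × Int)) × (Int × Int) × (Int × Int) × (Int × Int) × Int :=
  let xlo := min x_min x_max
  let xhi := max x_min x_max
  let ylo := min y_min y_max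
  let yhi := max y_min y_max
  let cols0 := PySem.List.pyRange xlo (xhi + 1) step_x
  -- `cols[-1]` raises IndexError on the empty list (step_x ≤ 0): excluded by Pre_, default unreachable
  let cols := if PySem.List.pyGetD cols0 (-1) 0 ≠ xhi then cols0 ++ [xhi] else cols0
  let n : Int := cols.length
  -- `start = [(ox, oy)]` then two conditional appends
  let start := [(origin_x, origin_y)]
    ++ (if origin_y ≠ yhi then [(origin_x, yhi)] else [])
    ++ (if origin_x ≠ xlo then [(xlo, yhi)] else [])
  -- the comprehension `[(cols[(j+1)//2], y_lo if (j//2)%2==0 else y_hi) for j in range(2*n-1)]`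
  -- (the cols index is always in range, so pyGetD's default is unreachable)
  let snake := (PySem.List.pyRange 0 (2 * n - 1) 1).map
    (fun j => (PySem.List.pyGetD cols (PySem.Int.floordiv (j + 1) 2) 0,
               if PySem.Int.mod (PySem.Int.floordiv j 2) 2 = 0 then ylo else yhi))
  -- `x_end, y_end = snake[-1]`; snake is nonempty (n ≥ 1 under Pre_)
  let xe := (PySem.List.pyGetD snake (-1) (0, 0)).1
  let ye := (PySem.List.pyGetD snake (-1) (0, 0)).2
  let tail := (if ye ≠ origin_y then [(xe, origin_y)] else [])
    ++ (if xe ≠ origin_x then [(origin_x, origin_y)] else [])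
  let s : Int := start.length
  let e : Int := s + snake.length
  (start ++ snake ++ tail, (0, s), (s - 1, e), (e - 1, e + tail.length),
   PySem.Int.floordiv n 2)

-- ===== PRECONDITION & SPEC =====
-- Pre_ excludes exactly the inputs where A raises: step_x ≤ 0 (range ValueError for step 0,
-- IndexError on the empty column list for negative step); B raises there too.
def Pre_generate_snake_path_gantry (x_min : Int) (y_min : Int) (x_max : Int) (y_max : Int) (step_x : Int) (step_y : Int) (origin_x : Int) (origin_y : Int) : Prop := 0 < step_x
instance (x_min : Int) (y_min : Int) (x_max : Int) (y_max : Int) (step_x : Int) (step_y : Int) (origin_x : Int) (origin_y : Int) : Decidable (Pre_generate_snake_path_gantry x_min y_min x_max y_max step_x step_y origin_x origin_y) := by unfold Pre_generate_snake_path_gantry; infer_instance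
def pvWitness_generate_snake_path_gantry : Int × Int × Int × Int × Int × Int × Int × Int := (0, 0, 3, 3, 1, 1, 0, 3)

def Spec_generate_snake_path_gantry (x_min : Int) (y_min : Int) (x_max : Int) (y_max : Int) (step_x : Int) (step_y : Int) (origin_x : Int) (origin_y : Int) (out : (List (Int × Int)) × (Int × Int) × (Int × Int) × (Int × Int) × Int) : Prop := out = generate_snake_path_gantry_alt x_min y_min x_max y_max step_x step_y origin_x origin_y
instance (x_min : Int) (y_min : Int) (x_max : Int) (y_max : Int) (step_x : Int) (step_y : Int) (origin_x : Int) (origin_y : Int) (out : (List (Int × Int)) × (Int × Int) × (Int × Int) × (Int × Int) × Int) : Decidable (Spec_generate_snake_path_gantry x_min y_min x_max y_max step_x step_y origin_x origin_y out) := by unfold Spec_generate_snake_path_gantry; infer_instance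

-- ===== CLAIM (what is proved, stated in full; the proofs are below) =====
def Claim_equal_generate_snake_path_gantry : Prop := ∀ (x_min : Int) (y_min : Int) (x_max : Int) (y_max : Int) (step_x : Int) (step_y : Int) (origin_x : Int) (origin_y : Int), Dom_generate_snake_path_gantry x_min y_min x_max y_max step_x step_y origin_x origin_y → Pre_generate_snake_path_gantry x_min y_min x_max y_max step_x step_y origin_x origin_y → Spec_generate_snake_path_gantry x_min y_min x_max y_max step_x step_y origin_x origin_y (generate_snake_path_gantry x_min y_min x_max y_max step_x step_y origin_x origin_y)

-- ===== LEMMAS AND PROOFS =====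

-- proof-side bridge: the per-column segment A's loop appends for column (i, c)
def pvSegB (ylo yhi : Int) (icx : Int × Int) : List (Int × Int) :=
  (if icx.1 > 0 then [(icx.2, if PySem.Int.mod icx.1 2 = 1 then ylo else yhi)] else [])
  ++ [(icx.2, if PySem.Int.mod icx.1 2 = 0 then ylo else yhi)]

-- A's snake loop, started at index s, appends exactly the per-column segments, adds the number
-- of odd indices in [s, s+len) to invertCount, and ends with downward = ((s+len) even)
theorem pv_fold_snake (ylo yhi : Int) (cols : List Int) (s : Int) (hs : 0 ≤ s)
    (p : List (Int × Int)) (inv : Int)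
    (hp : s = 0 ∨ (PySem.List.pyGetD p (-1) (0, 0)).2 = (if s % 2 = 1 then ylo else yhi)) :
    (PySem.List.enumerate cols s).foldl (pvStepA ylo yhi) (p, inv, decide (s % 2 = 0))
    = (p ++ (PySem.List.enumerate cols s).flatMap (pvSegB ylo yhi),
       inv + ((s + cols.length) / 2 - s / 2),
       decide ((s + cols.length) % 2 = 0)) := by
  induction cols generalizing s p inv with
  | nil => simp [PySem.List.enumerate_nil]
  | cons c cols ih =>
      rw [PySem.List.enumerate_cons, List.foldl_cons, List.flatMap_cons]
      by_cases hpar : s % 2 = 0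
      · -- downward column: endpoint ylo
        have hstep : pvStepA ylo yhi (p, inv, decide (s % 2 = 0)) (s, c)
            = ((if s > 0 then p ++ [(c, (PySem.List.pyGetD p (-1) (0, 0)).2)] else p)
                ++ [(c, ylo)], inv, false) := by
          simp [pvStepA, hpar]
        rw [hstep]
        have hfalse : (false : Bool) = decide ((s + 1) % 2 = 0) := by
          have : (s + 1) % 2 = 1 := by omega
          simp [this]
        have hnext : (PySem.List.pyGetD ((if s > 0 then p ++ [(c, (PySem.List.pyGetD p (-1) (0, 0)).2)] else p) ++ [(c, ylo)]) (-1) (0, 0)).2 = if (s + 1) % 2 = 1 then ylo else yhi := by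
          rw [PySem.List.pyGetD_neg_one_append_singleton]
          have h1 : (s + 1) % 2 = 1 := by omega
          simp [h1]
        rw [hfalse, ih (s + 1) (by omega) _ inv (Or.inr hnext)]
        have hseg : pvSegB ylo yhi (s, c)
            = (if s > 0 then [(c, (if s % 2 = 1 then ylo else yhi))] else []) ++ [(c, ylo)] := by
          rw [pvSegB]; simp [hpar]
        rw [hseg]
        rcases hp with h0 | hlast
        · subst h0
          refine Prod.ext ?_ (Prod.ext ?_ ?_)
          · simp [List.append_assoc]
          · simp only [List.length_cons]; push_cast; omega
          · simp only [List.length_cons, decide_eq_decide]; push_cast; omega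
        · by_cases hs0 : s > 0
          · rw [hlast]
            refine Prod.ext ?_ (Prod.ext ?_ ?_)
            · simp [hs0, List.append_assoc]
            · simp only [List.length_cons]; push_cast; omega
            · simp only [List.length_cons, decide_eq_decide]; push_cast; omega
          · have hz : s = 0 := by omega
            subst hz
            refine Prod.ext ?_ (Prod.ext ?_ ?_)
            · simp [List.append_assoc]
            · simp only [List.length_cons]; push_cast; omega
            · simp only [List.length_cons, decide_eq_decide]; push_cast; omega
      · -- upward column: endpoint yhi, invert
        have hpar1 : s % 2 = 1 := by omega
        have hs0 : s > 0 := by omega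
        have hstep : pvStepA ylo yhi (p, inv, decide (s % 2 = 0)) (s, c)
            = ((p ++ [(c, (PySem.List.pyGetD p (-1) (0, 0)).2)]) ++ [(c, yhi)], inv + 1, true) := by
          simp [pvStepA, hpar1, hs0]
        rw [hstep]
        have htrue : (true : Bool) = decide ((s + 1) % 2 = 0) := by
          have : (s + 1) % 2 = 0 := by omega
          simp [this]
        have hnext : (PySem.List.pyGetD ((p ++ [(c, (PySem.List.pyGetD p (-1) (0, 0)).2)]) ++ [(c, yhi)]) (-1) (0, 0)).2 = if (s + 1) % 2 = 1 then ylo else yhi := by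
          rw [PySem.List.pyGetD_neg_one_append_singleton]
          have h1 : (s + 1) % 2 = 0 := by omega
          simp [h1]
        rw [htrue, ih (s + 1) (by omega) _ (inv + 1) (Or.inr hnext)]
        rcases hp with h0 | hlast
        · omega
        · rw [hlast]
          have hseg : pvSegB ylo yhi (s, c)
              = [(c, (if s % 2 = 1 then ylo else yhi))] ++ [(c, yhi)] := by
            rw [pvSegB]; simp [hpar1, hs0]
          rw [hseg]
          refine Prod.ext ?_ (Prod.ext ?_ ?_)
          · simp [List.append_assoc]
          · simp only [List.length_cons]; push_cast; omega
          · simp only [List.length_cons, decide_eq_decide]; push_cast; omega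

-- the snake segment ends with the last column at parity height (s + len - 1)
theorem pv_flatMap_last (ylo yhi : Int) (cols : List Int) (s : Int) (h : cols ≠ []) :
    ((PySem.List.enumerate cols s).flatMap (pvSegB ylo yhi)).getLast?
    = some (cols.getLast h,
            if (s + cols.length - 1) % 2 = 0 then ylo else yhi) := by
  induction cols generalizing s with
  | nil => exact absurd rfl h
  | cons c cols ih =>
      rw [PySem.List.enumerate_cons, List.flatMap_cons]
      cases cols with
      | nil =>
          simp only [PySem.List.enumerate_nil, List.flatMap_nil, List.append_nil]
          rw [pvSegB]
          rw [List.getLast?_append]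
          simp
      | cons c' cols' =>
          rw [List.getLast?_append, ih (s + 1) (by simp)]
          have harg : s + 1 + (↑(c' :: cols').length : Int) - 1
              = s + (↑(c :: c' :: cols').length : Int) - 1 := by
            simp; omega
          rw [harg]
          simp [List.getLast]

-- pyGetD l (-1) given l's known last element
theorem pv_pyGetD_last {l : List (Int × Int)} {v : Int × Int}
    (h : l.getLast? = some v) : PySem.List.pyGetD l (-1) (0, 0) = v := by
  have hne : l ≠ [] := by intro hc; simp [hc] at h
  rw [PySem.List.pyGetD_neg_one _ _ hne]
  have := List.getLast?_eq_some_getLast (l := l) hne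
  rw [h] at this
  simpa using this.symm

-- pyGetD (p ++ q) (-1) given q's known last element
theorem pv_pyGetD_append_last {p q : List (Int × Int)} {v : Int × Int}
    (hq : q.getLast? = some v) :
    PySem.List.pyGetD (p ++ q) (-1) (0, 0) = v := by
  apply pv_pyGetD_last
  rw [List.getLast?_append, hq]
  rfl

-- A's start dogleg equals B's start segment
theorem pv_start_eq (xlo yhi ox oy : Int) :
    (if ox ≠ xlo
     then (if oy ≠ yhi then [(ox, oy)] ++ [(ox, yhi)] else [(ox, oy)])
          ++ [(xlo, if oy ≠ yhi then yhi else oy)]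
     else (if oy ≠ yhi then [(ox, oy)] ++ [(ox, yhi)] else [(ox, oy)]))
    = [(ox, oy)] ++ (if oy ≠ yhi then [(ox, yhi)] else [])
      ++ (if ox ≠ xlo then [(xlo, yhi)] else []) := by
  split_ifs <;> simp_all

-- B's closed-form snake comprehension, restricted to the columns from index s on, equals the
-- per-column segments of those columns (induction along the suffix)
theorem pv_map_suffix (ylo yhi : Int) (cols : List Int) (suffix : List Int) (s : Nat)
    (hs : 1 ≤ s) (hdrop : cols.drop s = suffix) (hlen : cols.length = s + suffix.length) :
    (PySem.List.pyRange (2 * (s : Int) - 1) (2 * (cols.length : Int) - 1) 1).map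
      (fun j => (PySem.List.pyGetD cols (PySem.Int.floordiv (j + 1) 2) 0,
                 if PySem.Int.mod (PySem.Int.floordiv j 2) 2 = 0 then ylo else yhi))
    = (PySem.List.enumerate suffix (s : Int)).flatMap (pvSegB ylo yhi) := by
  induction suffix generalizing s with
  | nil =>
      have : cols.length = s := by simpa using hlen
      rw [this, PySem.List.pyRange_one_eq_nil (by omega)]
      simp [PySem.List.enumerate_nil]
  | cons c rest ih =>
      have hlen' : cols.length = s + 1 + rest.length := by simp at hlen; omega
      have hcs : cols[s]? = some c := by
        have h0 : (cols.drop s)[0]? = cols[s + 0]? := List.getElem?_drop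
        rw [hdrop] at h0; simpa using h0.symm
      have hgetc : PySem.List.pyGetD cols (s : Int) 0 = c := by
        have hlt : s < cols.length := by omega
        rw [PySem.List.pyGetD_eq_getElem cols 0 (Int.natCast_nonneg s) (by exact_mod_cast hlt)]
        simp only [Int.toNat_natCast]
        have := List.getElem?_eq_getElem (l := cols) (i := s) hlt
        rw [hcs] at this; exact (Option.some_injective _ this).symm
      -- peel the two range elements 2s-1 and 2s
      rw [PySem.List.pyRange_one_cons (by push_cast [hlen']; omega), List.map_cons]
      rw [PySem.List.pyRange_one_cons (by push_cast [hlen']; omega), List.map_cons]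
      have e1 : PySem.Int.floordiv (2 * (s : Int) - 1 + 1) 2 = (s : Int) := by
        rw [PySem.Int.floordiv_eq_ediv_of_pos (by norm_num)]; omega
      have e2 : PySem.Int.floordiv (2 * (s : Int) - 1) 2 = (s : Int) - 1 := by
        rw [PySem.Int.floordiv_eq_ediv_of_pos (by norm_num)]; omega
      have e3 : PySem.Int.floordiv (2 * (s : Int) - 1 + 1 + 1) 2 = (s : Int) := by
        rw [PySem.Int.floordiv_eq_ediv_of_pos (by norm_num)]; omega
      have e4 : PySem.Int.floordiv (2 * (s : Int) - 1 + 1) 2 = (s : Int) := e1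
      have hmod : ∀ a : Int, PySem.Int.mod a 2 = a % 2 :=
        fun a => PySem.Int.mod_eq_emod_of_pos (by norm_num)
      rw [PySem.List.enumerate_cons, List.flatMap_cons]
      have hseg : pvSegB ylo yhi ((s : Int), c)
          = [(c, if ((s : Int) - 1) % 2 = 0 then ylo else yhi)]
            ++ [(c, if (s : Int) % 2 = 0 then ylo else yhi)] := by
        rw [pvSegB]
        have hs0 : ((s : Int) > 0) := by exact_mod_cast hs
        have : (PySem.Int.mod (s : Int) 2 = 1) ↔ (((s : Int) - 1) % 2 = 0) := by
          rw [hmod]; omega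
        simp only [hs0, if_pos, hmod]
        congr 2
        · by_cases hp : ((s : Int) - 1) % 2 = 0
          · simp [hp, show ((s : Int)) % 2 = 1 by omega]
          · simp [hp, show ¬ ((s : Int)) % 2 = 1 by omega]
      rw [hseg]
      have harith : 2 * (s : Int) - 1 + 1 + 1 = 2 * ((s : Int) + 1) - 1 := by ring
      rw [e1, e2, e3, harith]
      have hdrop' : cols.drop (s + 1) = rest := by
        have : cols.drop (s + 1) = (cols.drop s).drop 1 := by
          rw [List.drop_drop]
        rw [this, hdrop]; simp
      have hih := ih (s + 1) (by omega) hdrop' (by omega)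
      push_cast at hih ⊢
      rw [hih, hgetc, hmod, hmod]
      simp

-- B's whole snake comprehension equals the concatenation of all per-column segments
theorem pv_map_eq_flatMap (ylo yhi : Int) (cols : List Int) (h : cols ≠ []) :
    (PySem.List.pyRange 0 (2 * (cols.length : Int) - 1) 1).map
      (fun j => (PySem.List.pyGetD cols (PySem.Int.floordiv (j + 1) 2) 0,
                 if PySem.Int.mod (PySem.Int.floordiv j 2) 2 = 0 then ylo else yhi))
    = (PySem.List.enumerate cols 0).flatMap (pvSegB ylo yhi) := by
  cases cols with
  | nil => exact absurd rfl h
  | cons c rest =>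
      rw [PySem.List.pyRange_one_cons (by simp only [List.length_cons]; push_cast; omega), List.map_cons]
      have e1 : PySem.Int.floordiv ((0 : Int) + 1) 2 = 0 := by
        rw [PySem.Int.floordiv_eq_ediv_of_pos (by norm_num)]; decide
      have e2 : PySem.Int.floordiv (0 : Int) 2 = 0 := by
        rw [PySem.Int.floordiv_eq_ediv_of_pos (by norm_num)]; decide
      have hm0 : PySem.Int.mod (0 : Int) 2 = 0 := by
        rw [PySem.Int.mod_eq_emod_of_pos (by norm_num)]; decide
      rw [e1, e2, hm0]
      have hmap := pv_map_suffix ylo yhi (c :: rest) rest 1 le_rfl (by simp) (by simp only [List.length_cons]; omega)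
      have harith : (0 : Int) + 1 = 2 * ((1 : Nat) : Int) - 1 := by norm_num
      rw [harith, hmap]
      rw [PySem.List.enumerate_cons, List.flatMap_cons]
      have hseg0 : pvSegB ylo yhi ((0 : Int), c) = [(c, ylo)] := by
        rw [pvSegB]
        simp
      rw [hseg0]
      simp [PySem.List.pyGetD_zero_cons]

-- ===== VERDICT (by name: the statement is the Claim_ definition above) =====
theorem generate_snake_path_gantry_spec : Claim_equal_generate_snake_path_gantry := by
  intro xm ym xM yM sx sy ox oy hdom hpre
  unfold Spec_generate_snake_path_gantry
  unfold Pre_generate_snake_path_gantry at hpre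
  simp only [generate_snake_path_gantry, generate_snake_path_gantry_alt]
  set xlo := min xm xM with hxlo
  set xhi := max xm xM with hxhi
  set ylo := min ym yM with hylo
  set yhi := max ym yM with hyhi
  have hcols0 : PySem.List.pyRange xlo (xhi + 1) sx ≠ [] := by
    have hx : xlo ∈ PySem.List.pyRange xlo (xhi + 1) sx := by
      rw [PySem.List.mem_pyRange_iff_of_pos hpre]
      have hle : xlo ≤ xhi := min_le_max
      exact ⟨le_refl _, by omega, by simp⟩
    exact List.ne_nil_of_mem hx
  generalize hC : (if PySem.List.pyGetD (PySem.List.pyRange xlo (xhi + 1) sx) (-1) 0 ≠ xhi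
      then PySem.List.pyRange xlo (xhi + 1) sx ++ [xhi]
      else PySem.List.pyRange xlo (xhi + 1) sx) = cols
  have hcne : cols ≠ [] := by
    rw [← hC]; split_ifs
    · simp
    · exact hcols0
  rw [pv_start_eq]
  rw [show (true : Bool) = decide ((0 : Int) % 2 = 0) from by decide]
  rw [pv_fold_snake ylo yhi cols 0 le_rfl _ 0 (Or.inl rfl)]
  rw [pv_map_eq_flatMap ylo yhi cols hcne]
  have hf2 : ∀ a : Int, PySem.Int.floordiv a 2 = a / 2 :=
    fun a => PySem.Int.floordiv_eq_ediv_of_pos (by norm_num)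
  simp only [hf2]
  rw [pv_pyGetD_append_last (pv_flatMap_last ylo yhi cols 0 hcne)]
  rw [pv_pyGetD_last (pv_flatMap_last ylo yhi cols 0 hcne)]
  simp only [zero_add]
  have hS1 : 1 ≤ (([(ox, oy)] ++ if oy ≠ yhi then [(ox, yhi)] else [])
      ++ if ox ≠ xlo then [(xlo, yhi)] else []).length := by
    simp
  generalize hSg : (([(ox, oy)] ++ if oy ≠ yhi then [(ox, yhi)] else [])
      ++ if ox ≠ xlo then [(xlo, yhi)] else []) = S at hS1 ⊢
  generalize hGg : List.flatMap (pvSegB ylo yhi) (PySem.List.enumerate cols) = G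
  generalize hLg : cols.getLast hcne = L
  generalize hYg : (if ((cols.length : Int) - 1) % 2 = 0 then ylo else yhi) = YE
  split_ifs <;> simp [List.append_assoc, List.length_append] <;> omega
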